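-- pv_equiv track=rewrite | github.com/PrabhuBikash/PrabhuBikash.github.io | patternFinder/databaseGenerator.py | generate_all_subpatterns
-- ===== SOURCE A (Python) =====
-- linelength3 = [
--     '123', '321',
--     '147', '741',
--     '159', '951',
--     '258', '852',
--     '357', '753',
--     '456', '654',
--     '369', '963',
--     '789', '987'
-- ]
--
-- def generate_immidiate_subpatterns(pattern):
--     """Generate immediate subpatterns by removing middle dots for valid lines of 3."""
--     sub_patterns = set()
--
--     for i in range(len(pattern) - 2):
--         line = ''.join(pattern[i:i+3])  # Get a slice of 3 digits (e.g., '123')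
--
--         if line in linelength3:
--             new_pattern = pattern[:i+1] + pattern[i+2:]  # Keep first dots, remove middle, keep last dots
--             sub_patterns.add(new_pattern)
--     return sub_patterns
--
-- def generate_all_subpatterns(pattern, sub_patterns_found=None):
--     """Recursively generate sub-patterns by progressively removing valid middle dots."""
--     if sub_patterns_found is None:
--         sub_patterns_found = set()
--
--     sub_patterns_found.add(pattern)  # Mark the current pattern as processed
--     new_patterns = generate_immidiate_subpatterns(pattern)
--
--     for sub_pattern in new_patterns:
--         if sub_pattern not in sub_patterns_found:
--             generate_all_subpatterns(sub_pattern, sub_patterns_found)  # Recursively call to explore deeper sub-patterns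
--
--     return sub_patterns_found
-- ===== SOURCE B (Python) =====
-- linelength3 = [
--     '123', '321',
--     '147', '741',
--     '159', '951',
--     '258', '852',
--     '357', '753',
--     '456', '654',
--     '369', '963',
--     '789', '987'
-- ]
--
-- def _immediate_candidates(pattern):
--     """Immediate subpatterns via a sliding window of adjacent triples (zip), deduped keeping first occurrence."""
--     cands = [pattern[:i + 1] + pattern[i + 2:]
--              for i, (a, b, c) in enumerate(zip(pattern, pattern[1:], pattern[2:]))
--              if a + b + c in linelength3]
--     return list(dict.fromkeys(cands))
--
-- def generate_all_subpatterns(pattern, sub_patterns_found=None):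
--     """Iterative worklist (front-of-list stack) instead of recursion; mutates sub_patterns_found in place."""
--     found = set() if sub_patterns_found is None else sub_patterns_found
--     found.add(pattern)
--     stack = _immediate_candidates(pattern)
--     while stack:
--         p = stack.pop(0)
--         if p not in found:
--             found.add(p)
--             stack = _immediate_candidates(p) + stack
--     return found
-- ===== Notes on version B (the rewrite author's own statement) =====
-- stated objective: alternative
-- what changed: Replaced the recursive DFS with an iterative explicit-worklist loop, and replaced the index/range window scan of the helper with a zip-of-adjacent-triples sliding-window comprehension followed by a first-occurrence dedup.
import Mathlib
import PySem

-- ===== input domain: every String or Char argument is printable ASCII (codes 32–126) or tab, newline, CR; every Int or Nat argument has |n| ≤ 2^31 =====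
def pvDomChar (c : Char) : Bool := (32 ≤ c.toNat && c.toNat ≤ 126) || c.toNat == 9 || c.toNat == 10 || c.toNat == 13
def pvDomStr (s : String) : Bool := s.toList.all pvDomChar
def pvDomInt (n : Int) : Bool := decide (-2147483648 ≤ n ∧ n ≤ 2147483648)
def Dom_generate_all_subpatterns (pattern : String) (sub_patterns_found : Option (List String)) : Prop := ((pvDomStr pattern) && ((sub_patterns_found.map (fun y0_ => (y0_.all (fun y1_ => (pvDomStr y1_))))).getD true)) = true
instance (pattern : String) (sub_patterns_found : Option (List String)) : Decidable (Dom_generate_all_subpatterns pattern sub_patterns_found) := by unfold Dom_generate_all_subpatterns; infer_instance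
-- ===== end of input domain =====

-- B replaces A's recursive DFS by an iterative explicit-worklist loop and A's index/range window scan in
-- the helper by a zip-of-adjacent-triples sliding window with a first-occurrence dedup (same results; both
-- Python versions mutate the passed-in set identically; the equivalence proved here is about the return value).
-- Both ports work on `List Char` (the PySem string representation) and convert at the boundary.

-- ===== PORT A =====
-- linelength3 (module constant shared by Source A and Source B), as char lists
def pvLL3 : List (List Char) :=
  [['1','2','3'], ['3','2','1'],
   ['1','4','7'], ['7','4','1'],
   ['1','5','9'], ['9','5','1'],
   ['2','5','8'], ['8','5','2'],
   ['3','5','7'], ['7','5','3'],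
   ['4','5','6'], ['6','5','4'],
   ['3','6','9'], ['9','6','3'],
   ['7','8','9'], ['9','8','7']]

-- generate_immidiate_subpatterns (A's helper):
-- for i in range(len(pattern)-2): line = pattern[i:i+3]; if line in linelength3: add pattern[:i+1]+pattern[i+2:]
def pvImm (p : List Char) : PySem.Set (List Char) :=
  (PySem.List.pyRange 0 ((p.length : Int) - 2) 1).foldl
    (fun s i =>
      if PySem.List.slice p (some i) (some (i + 3)) ∈ pvLL3 then
        PySem.Set.add s (PySem.List.slice p none (some (i + 1)) ++ PySem.List.slice p (some (i + 2)) none)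
      else s)
    PySem.Set.empty

-- membership shape of the helper's accumulating loop (needed by the ports' termination proofs)
theorem pv_mem_foldl_cond {α : Type} [BEq α] [LawfulBEq α] (C : Int → Prop) [DecidablePred C]
    (f : Int → α) (l : List Int) (s0 : PySem.Set α) (x : α)
    (h : x ∈ l.foldl (fun s i => if C i then PySem.Set.add s (f i) else s) s0) :
    x ∈ s0 ∨ ∃ i ∈ l, x = f i := by
  induction l generalizing s0 with
  | nil => exact Or.inl h
  | cons a t ih =>
    simp only [List.foldl_cons] at h
    rcases ih _ h with h' | ⟨i, hi, hx⟩
    · by_cases hc : C a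
      · simp only [if_pos hc] at h'
        rcases (PySem.Set.mem_add _ _ _).mp h' with h'' | h''
        · exact Or.inl h''
        · exact Or.inr ⟨a, by simp, h''⟩
      · simp only [if_neg hc] at h'
        exact Or.inl h'
    · exact Or.inr ⟨i, by simp [hi], hx⟩

-- every immediate subpattern is exactly one character shorter (and forces length ≥ 3)
theorem pvImm_mem_len {p q : List Char} (h : q ∈ pvImm p) :
    q.length + 1 = p.length ∧ 3 ≤ p.length := by
  unfold pvImm at h
  rcases pv_mem_foldl_cond
      (fun i => PySem.List.slice p (some i) (some (i + 3)) ∈ pvLL3)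
      (fun i => PySem.List.slice p none (some (i + 1)) ++ PySem.List.slice p (some (i + 2)) none)
      _ _ _ h with h' | ⟨i, hi, hx⟩
  · simp [PySem.Set.empty] at h'
  · rw [PySem.List.mem_pyRange_one] at hi
    obtain ⟨h0, h2⟩ := hi
    have hk : i = ((i.toNat : Nat) : Int) := by omega
    have hn3 : 3 ≤ p.length := by omega
    subst hx
    rw [hk]
    have e1 : ((i.toNat : Nat) : Int) + 1 = (((i.toNat + 1 : Nat)) : Int) := by push_cast; ring
    have e2 : ((i.toNat : Nat) : Int) + 2 = (((i.toNat + 2 : Nat)) : Int) := by push_cast; ring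
    rw [e1, e2, PySem.List.slice_to_natCast, PySem.List.slice_from_natCast]
    simp only [List.length_append, List.length_take, List.length_drop]
    omega

-- generate_all_subpatterns (A): add pattern; for each immediate subpattern not yet found, recurse
def generate_all_subpatterns_go (pattern : List Char) (found : PySem.Set (List Char)) :
    PySem.Set (List Char) :=
  (pvImm pattern).attach.foldl
    (fun fd sp => if PySem.Set.contains fd sp.1 then fd else generate_all_subpatterns_go sp.1 fd)
    (PySem.Set.add found pattern)
termination_by pattern.length
decreasing_by
  have := pvImm_mem_len sp.2
  omega

def generate_all_subpatterns (pattern : String) (sub_patterns_found : Option (List String)) :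
    List String :=
  let fd0 : PySem.Set (List Char) :=
    match sub_patterns_found with
    | none => PySem.Set.empty
    | some xs => PySem.Set.ofList (xs.map String.toList)
  (generate_all_subpatterns_go pattern.toList fd0).map (fun cs => String.ofList cs)

-- ===== PORT B =====
-- _immediate_candidates (B's helper): sliding window of adjacent triples; the zip walk is transcribed as a
-- structural recursion carrying the (reversed) prefix already consumed, then first-occurrence dedup
-- (list(dict.fromkeys(..)) = PySem.Set.ofList).
def pvImmBgo (pre : List Char) (rest : List Char) : List (List Char) :=
  match rest with
  | a :: b :: c :: t =>
    if [a, b, c] ∈ pvLL3 then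
      (pre.reverse ++ a :: c :: t) :: pvImmBgo (a :: pre) (b :: c :: t)
    else pvImmBgo (a :: pre) (b :: c :: t)
  | _ => []

def pvImmB (p : List Char) : PySem.Set (List Char) := PySem.Set.ofList (pvImmBgo [] p)

-- weight used as the worklist's termination measure, and the facts about B's helper it needs
def pvW (q : List Char) : Nat := (q.length + 1).factorial

theorem pvImmBgo_mem_len : ∀ (rest pre q : List Char), q ∈ pvImmBgo pre rest →
    q.length + 1 = pre.length + rest.length := by
  intro rest
  induction rest with
  | nil => intro pre q h; simp [pvImmBgo] at h
  | cons a rest' ih =>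
    intro pre q h
    match rest' with
    | [] => simp [pvImmBgo] at h
    | [b] => simp [pvImmBgo] at h
    | b :: c :: t =>
      rw [pvImmBgo] at h
      split at h
      · rcases List.mem_cons.mp h with h' | h'
        · subst h'; simp; omega
        · have := ih (a :: pre) q h'
          simp at this ⊢; omega
      · have := ih (a :: pre) q h
        simp at this ⊢; omega

theorem pvImmBgo_len_le : ∀ (rest pre : List Char),
    (pvImmBgo pre rest).length ≤ rest.length - 2 := by
  intro rest
  induction rest with
  | nil => intro pre; simp [pvImmBgo]
  | cons a rest' ih =>
    intro pre
    match rest' with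
    | [] => simp [pvImmBgo]
    | [b] => simp [pvImmBgo]
    | b :: c :: t =>
      rw [pvImmBgo]
      have := ih (a :: pre)
      split
      · simp at this ⊢; omega
      · simp at this ⊢; omega

theorem pvImmB_wsum_lt (p : List Char) : ((pvImmB p).map pvW).sum < pvW p := by
  have hmem : ∀ q ∈ pvImmB p, q.length + 1 = p.length := by
    intro q hq
    have := pvImmBgo_mem_len p [] q ((PySem.Set.mem_ofList _ _).mp hq)
    simpa using this
  have hcnt : (pvImmB p).length ≤ p.length - 2 := by
    refine le_trans (PySem.Set.length_ofList_le _) ?_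
    simpa using pvImmBgo_len_le p []
  have hconst : ∀ q ∈ pvImmB p, pvW q = p.length.factorial := by
    intro q hq; simp only [pvW]; rw [hmem q hq]
  have hsum : ((pvImmB p).map pvW).sum = (pvImmB p).length * p.length.factorial := by
    rw [List.map_congr_left hconst]; simp [List.map_const', List.sum_replicate]
  rw [hsum, show pvW p = (p.length + 1) * p.length.factorial from by simp [pvW, Nat.factorial_succ]]
  exact Nat.mul_lt_mul_of_lt_of_le (by omega) (le_refl _) (Nat.factorial_pos _)


-- the worklist loop of Source B: pop from the front, push new candidates on the front
def generate_all_subpatterns_alt_go (found : PySem.Set (List Char)) (stack : List (List Char)) :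
    PySem.Set (List Char) :=
  match stack with
  | [] => found
  | p :: rest =>
    if PySem.Set.contains found p then generate_all_subpatterns_alt_go found rest
    else generate_all_subpatterns_alt_go (PySem.Set.add found p) (pvImmB p ++ rest)
termination_by (stack.map pvW).sum
decreasing_by
  · simp only [List.map_cons, List.sum_cons]
    have : 0 < pvW p := Nat.factorial_pos _
    omega
  · simp only [List.map_cons, List.sum_cons, List.map_append, List.sum_append]
    have h1 : ((pvImmB p).map pvW).sum < pvW p := pvImmB_wsum_lt p
    omega

def generate_all_subpatterns_alt (pattern : String) (sub_patterns_found : Option (List String)) :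
    List String :=
  let found := PySem.Set.add (PySem.Set.ofList ((sub_patterns_found.getD []).map String.toList))
                 pattern.toList
  (generate_all_subpatterns_alt_go found (pvImmB pattern.toList)).map (fun cs => String.ofList cs)

-- ===== PRECONDITION & SPEC =====
def Spec_generate_all_subpatterns (pattern : String) (sub_patterns_found : Option (List String)) (out : List String) : Prop := out = generate_all_subpatterns_alt pattern sub_patterns_found
instance (pattern : String) (sub_patterns_found : Option (List String)) (out : List String) : Decidable (Spec_generate_all_subpatterns pattern sub_patterns_found out) := by unfold Spec_generate_all_subpatterns; infer_instance

-- ===== CLAIM (what is proved, stated in full; the proofs are below) =====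
def Claim_equal_generate_all_subpatterns : Prop := ∀ (pattern : String) (sub_patterns_found : Option (List String)), Dom_generate_all_subpatterns pattern sub_patterns_found → Spec_generate_all_subpatterns pattern sub_patterns_found (generate_all_subpatterns pattern sub_patterns_found)

-- ===== LEMMAS AND PROOFS =====

-- the two helpers produce the same ordered candidate set, via a canonical candidate list
def pvCand (p : List Char) : List (List Char) :=
  (List.range (p.length - 2)).filterMap
    (fun i => if (p.drop i).take 3 ∈ pvLL3 then some (p.take (i + 1) ++ p.drop (i + 2)) else none)

theorem pvImmBgo_eq : ∀ (rest pre : List Char),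
    pvImmBgo pre rest = (pvCand rest).map (fun q => pre.reverse ++ q) := by
  intro rest
  induction rest with
  | nil => intro pre; simp [pvImmBgo, pvCand]
  | cons a rest' ih =>
    intro pre
    match rest' with
    | [] => simp [pvImmBgo, pvCand]
    | [b] => simp [pvImmBgo, pvCand]
    | b :: c :: t =>
      have hcand : pvCand (a :: b :: c :: t)
          = (if [a, b, c] ∈ pvLL3 then [a :: c :: t] else [])
            ++ (pvCand (b :: c :: t)).map (fun q => a :: q) := by
        unfold pvCand
        simp only [List.length_cons]
        have : t.length + 1 + 1 + 1 - 2 = (t.length + 1) := by omega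
        rw [this]
        rw [List.range_succ_eq_map, List.filterMap_cons]
        have h2 : t.length + 1 + 1 - 2 = t.length := by omega
        rw [h2]
        rw [List.filterMap_map]
        rw [List.map_filterMap]
        have htail : List.filterMap
            ((fun i =>
                if List.take 3 (List.drop i (a :: b :: c :: t)) ∈ pvLL3 then
                  some (List.take (i + 1) (a :: b :: c :: t) ++ List.drop (i + 2) (a :: b :: c :: t))
                else none) ∘ Nat.succ) (List.range t.length)
          = List.filterMap
            (fun x => Option.map (fun q => a :: q)
              (if List.take 3 (List.drop x (b :: c :: t)) ∈ pvLL3 then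
                some (List.take (x + 1) (b :: c :: t) ++ List.drop (x + 2) (b :: c :: t))
              else none)) (List.range t.length) := by
          apply List.filterMap_congr
          intro i _
          simp only [Function.comp_apply, Nat.succ_eq_add_one,
            List.drop_succ_cons, List.take_succ_cons]
          split <;> rfl
        rw [htail]
        by_cases hm : [a, b, c] ∈ pvLL3
        · have : List.take 3 (List.drop 0 (a :: b :: c :: t)) = [a, b, c] := rfl
          rw [this, if_pos hm, if_pos hm]
          rfl
        · have : List.take 3 (List.drop 0 (a :: b :: c :: t)) = [a, b, c] := rfl
          rw [this, if_neg hm, if_neg hm]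
          rfl
      rw [pvImmBgo]
      split
      · rename_i h
        rw [hcand, if_pos h, ih (a :: pre)]
        simp [Function.comp]
      · rename_i h
        rw [hcand, if_neg h, ih (a :: pre)]
        simp [Function.comp]

theorem pv_foldl_cond_filterMap {ι α : Type} [BEq α] (C : ι → Prop) [DecidablePred C]
    (f : ι → α) (l : List ι) (s0 : PySem.Set α) :
    l.foldl (fun s i => if C i then PySem.Set.add s (f i) else s) s0
      = (l.filterMap (fun i => if C i then some (f i) else none)).foldl PySem.Set.add s0 := by
  induction l generalizing s0 with
  | nil => rfl
  | cons a t ih =>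
    simp only [List.foldl_cons, List.filterMap_cons]
    split <;> simp_all

theorem pvImm_eq_cand (p : List Char) : pvImm p = PySem.Set.ofList (pvCand p) := by
  unfold pvImm
  rw [PySem.List.pyRange_one]
  have h1 : ((p.length : Int) - 2 - 0).toNat = p.length - 2 := by omega
  rw [h1, List.foldl_map]
  rw [pv_foldl_cond_filterMap
        (fun k : Nat => PySem.List.slice p (some (0 + (k : Int))) (some (0 + (k : Int) + 3)) ∈ pvLL3)
        (fun k : Nat => PySem.List.slice p none (some (0 + (k : Int) + 1))
            ++ PySem.List.slice p (some (0 + (k : Int) + 2)) none)]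
  have hfun : (fun k : Nat => if PySem.List.slice p (some (0 + (k : Int))) (some (0 + (k : Int) + 3)) ∈ pvLL3
        then some (PySem.List.slice p none (some (0 + (k : Int) + 1))
            ++ PySem.List.slice p (some (0 + (k : Int) + 2)) none) else none)
      = (fun i : Nat => if (p.drop i).take 3 ∈ pvLL3 then some (p.take (i + 1) ++ p.drop (i + 2)) else none) := by
    funext k
    have e1 : (0 : Int) + (k : Int) + 1 = (((k + 1 : Nat)) : Int) := by push_cast; ring
    have e2 : (0 : Int) + (k : Int) + 2 = (((k + 2 : Nat)) : Int) := by push_cast; ring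
    rw [e1, e2, PySem.List.slice_to_natCast, PySem.List.slice_from_natCast]
    rw [show ((0:Int) + (k:Int)) = ((k:Nat):Int) from by ring]
    rw [show ((k:Int) + 3) = ((k:Nat):Int) + ((3:Nat):Int) from by norm_num]
    rw [PySem.List.slice_natCast_add]
  rw [hfun]
  rw [PySem.Set.ofList_eq_foldl]
  rfl

theorem pvImmB_eq (p : List Char) : pvImmB p = pvImm p := by
  rw [pvImm_eq_cand, pvImmB, pvImmBgo_eq p []]
  simp


-- A's loop step on the found-set
def pvStep (fd : PySem.Set (List Char)) (sp : List Char) : PySem.Set (List Char) :=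
  if PySem.Set.contains fd sp then fd else generate_all_subpatterns_go sp fd

theorem altgo_nil (fd : PySem.Set (List Char)) : generate_all_subpatterns_alt_go fd [] = fd := by
  rw [generate_all_subpatterns_alt_go]

theorem altgo_cons (fd : PySem.Set (List Char)) (p : List Char) (rest : List (List Char)) :
    generate_all_subpatterns_alt_go fd (p :: rest)
      = if PySem.Set.contains fd p then generate_all_subpatterns_alt_go fd rest
        else generate_all_subpatterns_alt_go (PySem.Set.add fd p) (pvImm p ++ rest) := by
  rw [generate_all_subpatterns_alt_go, pvImmB_eq]

theorem goA_eq (p : List Char) (fd : PySem.Set (List Char)) :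
    generate_all_subpatterns_go p fd = (pvImm p).foldl pvStep (PySem.Set.add fd p) := by
  rw [generate_all_subpatterns_go]
  show (pvImm p).attach.foldl (fun fd sp => pvStep fd sp.1) (PySem.Set.add fd p) = _
  exact List.foldl_attach ..

-- running the DFS fold over `news` then the worklist on `stack` is the worklist on `news ++ stack`
theorem pvB_foldl (n : Nat) :
    ∀ news : List (List Char), (∀ sp ∈ news, sp.length < n) →
      ∀ found stack,
        generate_all_subpatterns_alt_go (news.foldl pvStep found) stack
          = generate_all_subpatterns_alt_go found (news ++ stack) := by
  induction n using Nat.strong_induction_on with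
  | _ n ih =>
    intro news
    induction news with
    | nil => intro _ found stack; simp
    | cons sp rest ihr =>
      intro hlen found stack
      have hsp : sp.length < n := hlen sp (by simp)
      have hrest : ∀ q ∈ rest, q.length < n := fun q hq => hlen q (by simp [hq])
      simp only [List.foldl_cons, List.cons_append]
      rw [ihr hrest]
      rw [altgo_cons]
      by_cases hc : PySem.Set.contains found sp = true
      · rw [if_pos hc]
        have : pvStep found sp = found := by rw [pvStep, if_pos hc]
        rw [this]
      · rw [if_neg hc]
        have : pvStep found sp = generate_all_subpatterns_go sp found := by rw [pvStep, if_neg hc]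
        rw [this, goA_eq]
        rw [ih sp.length hsp (pvImm sp)
              (fun q hq => by have := pvImm_mem_len hq; omega)
              (PySem.Set.add found sp) (rest ++ stack)]

theorem main_go (p : List Char) (fd : PySem.Set (List Char)) :
    generate_all_subpatterns_go p fd
      = generate_all_subpatterns_alt_go (PySem.Set.add fd p) (pvImmB p) := by
  rw [goA_eq, pvImmB_eq]
  have h := pvB_foldl (p.length) (pvImm p)
      (fun q hq => by have := pvImm_mem_len hq; omega)
      (PySem.Set.add fd p) []
  simp only [List.append_nil] at h
  rw [← altgo_nil ((pvImm p).foldl pvStep (PySem.Set.add fd p))]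
  exact h

-- ===== VERDICT (by name: the statement is the Claim_ definition above) =====
theorem generate_all_subpatterns_spec : Claim_equal_generate_all_subpatterns := by
  intro pattern sub_patterns_found _
  unfold Spec_generate_all_subpatterns generate_all_subpatterns generate_all_subpatterns_alt
  dsimp only
  rw [main_go]
  cases sub_patterns_found <;> rfl
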